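-- pv_equiv track=rewrite | github.com/cche0214/Influence-Maximization-Study-and-Experience | Maximin_Bottle_500.py | NodeSelection
-- ===== SOURCE A (Python) =====
-- from collections import defaultdict, deque
--
-- def NodeSelection(RR_sets, k):
--     """
--     经典 IMM 的 NodeSelection：在 RR-sets 上做贪心覆盖，返回覆盖最多 RR-sets 的 k 个节点。
--     """
--     if not RR_sets or k <= 0:
--         return set()
--
--     cover_dict = defaultdict(set)  # 节点 -> 出现过的 RR 下标集合
--     rr_to_nodes = []               # RR 下标 -> 该 RR 的节点集合
--     for idx, rr in enumerate(RR_sets):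
--         rrs = set(rr)
--         rr_to_nodes.append(rrs)
--         for v in rrs:
--             cover_dict[v].add(idx)
--
--     covered = set()  # 已覆盖的 RR 下标
--     S = set()
--
--     for _ in range(k):
--         best_node, best_new = None, -1
--         for v, idxs in cover_dict.items():
--             if v in S:
--                 continue
--             gain = len(idxs - covered)
--             if gain > best_new:
--                 best_new = gain
--                 best_node = v
--
--         if best_node is None or best_new <= 0:
--             break
--
--         S.add(best_node)
--         newly_covered = cover_dict[best_node] - covered
--         covered.update(newly_covered)
--
--         # 增量更新：仅在受影响的 RR 中移除引用
--         for rr_idx in newly_covered: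
--             for u in rr_to_nodes[rr_idx]:
--                 if rr_idx in cover_dict[u]:
--                     cover_dict[u].discard(rr_idx)
--
--     return S
-- ===== SOURCE B (Python) =====
-- import heapq
--
-- def _pop_best(heap, cover, covered):
--     """CELF lazy pop: return (gain, node) for the node with the best
--     (gain, -insertion_order) among unselected nodes, refreshing stale heap keys."""
--     while heap:
--         neg_gain, order, v = heapq.heappop(heap)
--         g = len(cover[v] - covered)
--         if heap and (-g, order) > (heap[0][0], heap[0][1]):
--             heapq.heappush(heap, (-g, order, v))
--             continue
--         return g, v
--     return None
--
-- def NodeSelection(RR_sets, k):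
--     """Lazy-greedy (CELF) max coverage over RR-sets: same k nodes as the
--     round-robin rescan, via a heap keyed by (-gain, insertion_order)."""
--     if not RR_sets or k <= 0:
--         return set()
--
--     cover = {}  # node -> set of RR indices, in first-appearance order
--     for idx, rr in enumerate(RR_sets):
--         for v in set(rr):
--             if v not in cover:
--                 cover[v] = set()
--             cover[v].add(idx)
--
--     heap = [(-len(idxs), order, v) for order, (v, idxs) in enumerate(cover.items())]
--     heapq.heapify(heap)
--
--     covered = set()
--     S = set()
--     for _ in range(k):
--         got = _pop_best(heap, cover, covered)
--         if got is None:
--             break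
--         g, v = got
--         if g <= 0:
--             break
--         S.add(v)
--         covered |= cover[v]
--     return S
-- ===== Notes on version B (the rewrite author's own statement) =====
-- stated objective: alternative
-- what changed: Replaces A's per-round rescan of every node with a CELF lazy-greedy min-heap keyed by (-gain, insertion_order): a popped entry's gain is recomputed and the entry pushed back only while stale, so most rounds touch a few heap entries instead of all nodes; intended as faster, a timing run measured about 1.5-2x but did not confirm it consistently at the largest size.
import Mathlib
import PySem

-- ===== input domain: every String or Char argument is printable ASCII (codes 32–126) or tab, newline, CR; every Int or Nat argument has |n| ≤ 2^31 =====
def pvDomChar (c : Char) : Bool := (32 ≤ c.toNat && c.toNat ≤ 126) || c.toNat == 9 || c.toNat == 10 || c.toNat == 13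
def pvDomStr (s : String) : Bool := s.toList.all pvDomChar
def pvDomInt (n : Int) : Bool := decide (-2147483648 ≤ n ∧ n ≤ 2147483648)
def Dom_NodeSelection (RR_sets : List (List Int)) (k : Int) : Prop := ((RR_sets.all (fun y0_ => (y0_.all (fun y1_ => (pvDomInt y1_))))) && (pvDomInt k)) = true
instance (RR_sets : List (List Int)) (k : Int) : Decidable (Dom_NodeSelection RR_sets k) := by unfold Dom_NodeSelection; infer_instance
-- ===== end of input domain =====

-- B replaces A's full rescan of all nodes every round by a CELF lazy-greedy priority
-- queue keyed by (-gain, insertion_order) with stale-entry recomputation (objective: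
-- alternative; intended as faster, but a timing run did not consistently confirm it).

-- ---------------------------------------------------------------------------
-- Shared primitive: the iteration order of CPython's `set(xs)` for a list of ints.
-- Both Pythons call `set(rr)`, whose iteration order (hash-table order) the tie-break
-- of the greedy depends on; PySem does not model it, so it is hand-ported here from
-- CPython's setobject.c, step for step (open addressing, LINEAR_PROBES = 9,
-- growth fill*5 >= mask*3 -> nearest power of two above used*4, resp. used*2 above
-- 50000).  Exact for ints with |x| < 2^61 - 1 (then hash(x) = x, except hash(-1) = -2),
-- which covers the whole stated domain |x| ≤ 2^31.
-- ---------------------------------------------------------------------------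

def pyHash (x : Int) : Int := if x = -1 then -2 else x

-- scan slots j, j+1, …, j+cnt-1 for the key or the first empty slot
def scanSlots (table : Array (Option Int)) (key : Int) : Nat → Nat → Option (Nat × Bool)
  | _, 0 => none
  | j, Nat.succ cnt =>
    match table.getD j none with
    | none => some (j, false)
    | some k' => if k' = key then some (j, true) else scanSlots table key (j+1) cnt

-- set_add_entry's probe loop (fuel-bounded; the fuel given below always suffices
-- because the table always keeps an empty slot)
def findSlot (table : Array (Option Int)) (key : Int) (mask : Nat) : Nat → Nat → Nat → (Nat × Bool)
  | 0, i, _ => (i, false)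
  | Nat.succ fuel, i, perturb =>
    let probes : Nat := if i + 9 ≤ mask then 9 else 0
    match scanSlots table key i (probes+1) with
    | some r => r
    | none => findSlot table key mask fuel ((i*5+1+(perturb >>> 5)) % (mask+1)) (perturb >>> 5)

def cleanScan (table : Array (Option Int)) : Nat → Nat → Option Nat
  | _, 0 => none
  | j, Nat.succ cnt =>
    match table.getD j none with
    | none => some j
    | some _ => cleanScan table (j+1) cnt

-- set_insert_clean (used only on resize: looks for an empty slot)
def insertCleanAux (key : Int) (mask : Nat) : Nat → Array (Option Int) → Nat → Nat → Array (Option Int)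
  | 0, table, _, _ => table
  | Nat.succ fuel, table, i, perturb =>
    match table.getD i none with
    | none => table.set! i (some key)
    | some _ =>
      match (if i + 9 ≤ mask then cleanScan table (i+1) 9 else none) with
      | some j => table.set! j (some key)
      | none => insertCleanAux key mask fuel table ((i*5+1+(perturb >>> 5)) % (mask+1)) (perturb >>> 5)

-- newsize = 8; while newsize <= minused: newsize <<= 1
def calcSizeAux (minused : Nat) : Nat → Nat → Nat
  | 0, cur => cur
  | Nat.succ f, cur => if cur ≤ minused then calcSizeAux minused f (cur*2) else cur

-- perturb starts as (size_t)hash, i.e. hash mod 2^64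
def perturb0 (h : Int) : Nat := (h.emod (2^64)).toNat

def insertClean (table : Array (Option Int)) (key : Int) : Array (Option Int) :=
  let h := pyHash key
  let mask := table.size - 1
  insertCleanAux key mask (table.size + 16) table ((h.emod (mask+1)).toNat) (perturb0 h)

def setAddOne (st : Array (Option Int) × Nat) (x : Int) : Array (Option Int) × Nat :=
  let table := st.1
  let fill := st.2
  let h := pyHash x
  let mask := table.size - 1
  let r := findSlot table x mask (table.size + 16) ((h.emod (mask+1)).toNat) (perturb0 h)
  if r.2 then (table, fill)
  else
    let table := table.set! r.1 (some x)
    let fill := fill + 1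
    if fill * 5 ≥ mask * 3 then
      let minused := if fill > 50000 then fill * 2 else fill * 4
      let ns := calcSizeAux minused 80 8
      (table.foldl (fun t e => match e with
          | none => t
          | some kk => insertClean t kk) (Array.replicate ns none), fill)
    else (table, fill)

-- iteration order of set(xs): occupied slots in table order
def pySetOrder (xs : List Int) : List Int :=
  ((xs.foldl setAddOne (Array.replicate 8 none, 0)).1.toList).filterMap id

-- enumerate(xs) with Nat indices (list indices are nonnegative)
def enumN {α : Type} : Nat → List α → List (Nat × α)
  | _, [] => []
  | s, x :: xs => (s, x) :: enumN (s+1) xs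

-- Python set difference + len on RR-index sets: `len(idxs - covered)` filters the
-- kept elements; sets of RR indices are modelled as lists of distinct Nats
def gainList (covered : List Nat) (l : List Nat) : List Nat :=
  l.filter (fun i => !covered.contains i)

-- ===== PORT A =====

-- cover_dict[v].add(idx)  (defaultdict(set): missing key -> new entry at the end)
def addIdxA : List (Int × List Nat) → Int → Nat → List (Int × List Nat)
  | [], v, idx => [(v, [idx])]
  | (u, l) :: rest, v, idx =>
    if u = v then (u, if l.contains idx then l else l ++ [idx]) :: rest
    else (u, l) :: addIdxA rest v idx

-- the construction loop: cover_dict (insertion order) and rr_to_nodes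
def buildA (RR_sets : List (List Int)) : List (Int × List Nat) × List (List Int) :=
  (enumN 0 RR_sets).foldl
    (fun st p =>
      let rrs := pySetOrder p.2
      (rrs.foldl (fun cd v => addIdxA cd v p.1) st.1, st.2 ++ [rrs]))
    ([], [])

-- the selection scan: best_node, best_new = None, -1; strict improvement only
def scanA (cd : List (Int × List Nat)) (S : List Int) (covered : List Nat) : Option Int × Int :=
  cd.foldl
    (fun b p =>
      if S.contains p.1 then b
      else
        let gain : Int := ((gainList covered p.2).length : Int)
        if gain > b.2 then (some p.1, gain) else b)
    (none, -1)

-- `if rr_idx in cover_dict[u]: cover_dict[u].discard(rr_idx)`  (a defaultdict would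
-- create a missing key u, but every u in rr_to_nodes[i] is already a key of cover_dict)
def discardOne : List (Int × List Nat) → Int → Nat → List (Int × List Nat)
  | [], _, _ => []
  | (u, l) :: rest, w, i =>
    if u = w then (u, if l.contains i then l.filter (fun j => j ≠ i) else l) :: rest
    else (u, l) :: discardOne rest w i

def discardAll (cd : List (Int × List Nat)) (newly : List Nat) (rtn : List (List Int)) :
    List (Int × List Nat) :=
  newly.foldl (fun cd i => (rtn.getD i []).foldl (fun cd u => discardOne cd u i) cd) cd

def loopA : Nat → List (Int × List Nat) → List (List Int) → List Nat → List Int → List Int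
  | 0, _, _, _, S => S
  | Nat.succ fuel, cd, rtn, covered, S =>
    let bb := scanA cd S covered
    match bb.1 with
    | none => S
    | some v =>
      if bb.2 ≤ 0 then S
      else
        let newly := gainList covered ((cd.lookup v).getD [])
        loopA fuel (discardAll cd newly rtn) rtn (covered ++ newly) (S ++ [v])

def NodeSelection (RR_sets : List (List Int)) (k : Int) : List Int :=
  if RR_sets = [] ∨ k ≤ 0 then []
  else
    let b := buildA RR_sets
    loopA k.toNat b.1 b.2 [] []

-- ===== PORT B =====

-- `if v not in cover: cover[v] = set()`
def dictSetDefault (cover : List (Int × List Nat)) (v : Int) : List (Int × List Nat) :=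
  if cover.lookup v = none then cover ++ [(v, [])] else cover

-- `cover[v].add(idx)`  (keys are unique, so updating every matching entry is the dict update)
def dictAddTo (cover : List (Int × List Nat)) (v : Int) (idx : Nat) : List (Int × List Nat) :=
  cover.map (fun p => if p.1 = v then (p.1, if p.2.contains idx then p.2 else p.2 ++ [idx]) else p)

def buildB (RR_sets : List (List Int)) : List (Int × List Nat) :=
  (enumN 0 RR_sets).foldl
    (fun cover p =>
      (pySetOrder p.2).foldl (fun cover v => dictAddTo (dictSetDefault cover v) v p.1) cover)
    []

-- strict `<` on heap keys (negated gain, insertion order): Python tuple comparison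
def keyLt (a b : Int × Nat) : Bool := a.1 < b.1 || (a.1 == b.1 && a.2 < b.2)

-- heap[0] of the heapq heap: its minimal element (keys are distinct)
def heapMin : List (Int × Nat × Int) → Option (Int × Nat × Int)
  | [] => none
  | e :: rest =>
    match heapMin rest with
    | none => some e
    | some m => if keyLt (m.1, m.2.1) (e.1, e.2.1) then some m else some e

-- _pop_best: lazy CELF pop with stale-entry recomputation; the fuel argument only
-- bounds the recursion (heap.length + 1 always suffices: each push-back replaces a
-- stale key by its exact value, and a popped exact minimum is returned at once)
def popBest : Nat → List (Int × Nat × Int) → List (Int × List Nat) → List Nat →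
    Option ((Int × Int) × List (Int × Nat × Int))
  | 0, _, _, _ => none
  | Nat.succ fuel, heap, cover, covered =>
    match heapMin heap with
    | none => none
    | some e =>
      let rest := heap.erase e
      let g : Int := ((gainList covered ((cover.lookup e.2.2).getD [])).length : Int)
      match heapMin rest with
      | some m =>
        if keyLt (m.1, m.2.1) (-g, e.2.1) then popBest fuel ((-g, e.2.1, e.2.2) :: rest) cover covered
        else some ((g, e.2.2), rest)
      | none => some ((g, e.2.2), rest)

def loopB : Nat → List (Int × Nat × Int) → List (Int × List Nat) → List Nat → List Int → List Int
  | 0, _, _, _, S => S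
  | Nat.succ fuel, heap, cover, covered, S =>
    match popBest (heap.length + 1) heap cover covered with
    | none => S
    | some r =>
      if r.1.1 ≤ 0 then S
      else
        loopB fuel r.2 cover
          (covered ++ gainList covered ((cover.lookup r.1.2).getD [])) (S ++ [r.1.2])

def NodeSelection_alt (RR_sets : List (List Int)) (k : Int) : List Int :=
  if RR_sets = [] ∨ k ≤ 0 then []
  else
    let cover := buildB RR_sets
    let heap := (enumN 0 cover).map (fun p => (-(p.2.2.length : Int), p.1, p.2.1))
    loopB k.toNat heap cover [] []

-- ===== PRECONDITION & SPEC =====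
def Spec_NodeSelection (RR_sets : List (List Int)) (k : Int) (out : List Int) : Prop := out = NodeSelection_alt RR_sets k
instance (RR_sets : List (List Int)) (k : Int) (out : List Int) : Decidable (Spec_NodeSelection RR_sets k out) := by unfold Spec_NodeSelection; infer_instance

-- ===== CLAIM (what is proved, stated in full; the proofs are below) =====
def Claim_equal_NodeSelection : Prop := ∀ (RR_sets : List (List Int)) (k : Int), Dom_NodeSelection RR_sets k → Spec_NodeSelection RR_sets k (NodeSelection RR_sets k)

-- ===== LEMMAS AND PROOFS =====

-- ---- proof-side abbreviations ----

-- the (Int-valued) marginal gain of a node with RR-index list l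
def gI (covered l : List Nat) : Int := ((gainList covered l).length : Int)

-- A's cover_dict after the discards = the original lists filtered by `covered`
def mapFilter (pairs : List (Int × List Nat)) (covered : List Nat) : List (Int × List Nat) :=
  pairs.map (fun p => (p.1, gainList covered p.2))

def KeysOK (pairs : List (Int × List Nat)) : Prop := (pairs.map Prod.fst).Nodup

def RelRR (pairs : List (Int × List Nat)) (rtn : List (List Int)) : Prop :=
  ∀ p ∈ pairs, ∀ i ∈ p.2, i < rtn.length ∧ p.1 ∈ rtn.getD i []

-- the candidates of a round: enumerated unselected nodes, in dict order
def cands (pairs : List (Int × List Nat)) (S : List Int) : List (Nat × Int × List Nat) :=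
  (enumN 0 pairs).filter (fun q => !S.contains q.2.1)

-- true (current) gain of node v, as popBest recomputes it
def trueG (pairs : List (Int × List Nat)) (covered : List Nat) (v : Int) : Int :=
  gI covered ((pairs.lookup v).getD [])

-- number of strictly stale heap entries (termination measure of popBest)
def staleN (pairs : List (Int × List Nat)) (covered : List Nat)
    (heap : List (Int × Nat × Int)) : Nat :=
  heap.countP (fun e => decide (e.1 < -(trueG pairs covered e.2.2)))

-- heap invariant: orders are exactly the candidate orders, every entry names its
-- candidate's node, and its stored key is a lower bound of the true key
def InvH (pairs : List (Int × List Nat)) (S : List Int) (covered : List Nat)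
    (heap : List (Int × Nat × Int)) : Prop :=
  (heap.map (fun e => e.2.1)).Perm ((cands pairs S).map (fun q => q.1)) ∧
  (∀ e ∈ heap, (∃ q ∈ cands pairs S, q.1 = e.2.1 ∧ q.2.1 = e.2.2) ∧
      e.1 ≤ -(trueG pairs covered e.2.2))

-- ---- gainList basics ----

theorem gain_nil (l : List Nat) : gainList [] l = l := by
  simp [gainList]

theorem gain_gain (c l : List Nat) : gainList c (gainList c l) = gainList c l := by
  simp [gainList, List.filter_filter]

theorem gain_append (c d l : List Nat) :
    gainList (c ++ d) l = gainList d (gainList c l) := by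
  simp [gainList, List.filter_filter]
  congr 1
  funext i
  by_cases h : i ∈ c <;> by_cases h2 : i ∈ d <;> simp [h, h2]

theorem gain_append_le (c d l : List Nat) :
    (gainList (c ++ d) l).length ≤ (gainList c l).length := by
  rw [gain_append]; exact List.length_filter_le _ _

-- ---- the two builds agree, keys are distinct, and RelRR holds ----

theorem addIdxA_eq_B (cd : List (Int × List Nat)) (v : Int) (i : Nat) (h : KeysOK cd) :
    addIdxA cd v i = dictAddTo (dictSetDefault cd v) v i := by
  induction cd with
  | nil => simp [addIdxA, dictSetDefault, dictAddTo]
  | cons p rest ih =>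
    obtain ⟨u, l⟩ := p
    simp only [KeysOK, List.map_cons, List.nodup_cons] at h
    by_cases huv : u = v
    · subst huv
      have hmap : List.map (fun p => if p.1 = u then (p.1, if i ∈ p.2 then p.2 else p.2 ++ [i]) else p) rest = rest := by
        have hcg : ∀ a ∈ rest, (fun p => if p.1 = u then (p.1, if i ∈ p.2 then p.2 else p.2 ++ [i]) else p) a = id a := by
          intro a ha
          have hne : ¬ a.1 = u := fun hh => h.1 (hh ▸ List.mem_map_of_mem ha)
          simp [hne]
        rw [List.map_congr_left hcg, List.map_id]
      simp [addIdxA, dictSetDefault, dictAddTo, List.lookup, hmap]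
    · have hvu : ¬ v = u := fun hh => huv hh.symm
      have hbe : (v == u) = false := by simp [hvu]
      simp only [addIdxA, if_neg huv]
      rw [ih h.2]
      by_cases hr : rest.lookup v = none <;>
        simp [dictSetDefault, List.lookup, hr, dictAddTo, huv, hbe, List.map_append]

theorem addIdxA_keys (cd : List (Int × List Nat)) (v : Int) (i : Nat) :
    (addIdxA cd v i).map Prod.fst =
      if v ∈ cd.map Prod.fst then cd.map Prod.fst else cd.map Prod.fst ++ [v] := by
  induction cd with
  | nil => simp [addIdxA]
  | cons p rest ih =>
    obtain ⟨u, l⟩ := p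
    by_cases huv : u = v
    · subst huv; simp [addIdxA]
    · have : ¬ v = u := fun hh => huv hh.symm
      simp only [addIdxA, if_neg huv, List.map_cons, ih, List.mem_cons, this, false_or]
      by_cases hv : v ∈ rest.map Prod.fst <;> simp [hv]

theorem addIdxA_keysOK (cd : List (Int × List Nat)) (v : Int) (i : Nat) (h : KeysOK cd) :
    KeysOK (addIdxA cd v i) := by
  unfold KeysOK at *
  rw [addIdxA_keys]
  by_cases hv : v ∈ cd.map Prod.fst
  · simpa [hv]
  · simp only [hv, ite_false]
    simp [List.nodup_append, h]
    intro a x ha hav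
    exact hv (hav ▸ (List.mem_map_of_mem ha : (a, x).1 ∈ _))

theorem addIdxA_mem (cd : List (Int × List Nat)) (v : Int) (idx : Nat) :
    ∀ p ∈ addIdxA cd v idx, ∀ i ∈ p.2,
      (∃ p' ∈ cd, p'.1 = p.1 ∧ i ∈ p'.2) ∨ (p.1 = v ∧ i = idx) := by
  induction cd with
  | nil =>
    intro p hp i hi
    simp [addIdxA] at hp
    subst hp
    simp at hi
    exact Or.inr ⟨rfl, hi⟩
  | cons q rest ih =>
    obtain ⟨u, l⟩ := q
    intro p hp i hi
    rw [addIdxA] at hp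
    by_cases huv : u = v
    · subst huv
      rw [if_pos rfl] at hp
      rcases List.mem_cons.mp hp with hp2 | hp2
      · subst hp2
        simp only at hi
        by_cases hc : l.contains idx
        · simp only [hc, if_pos] at hi
          exact Or.inl ⟨(u, l), List.mem_cons_self .., rfl, hi⟩
        · simp only [hc, if_neg, Bool.false_eq_true, not_false_iff] at hi
          rcases List.mem_append.mp hi with h1 | h1
          · exact Or.inl ⟨(u, l), List.mem_cons_self .., rfl, h1⟩
          · simp at h1
            exact Or.inr ⟨rfl, h1⟩
      · exact Or.inl ⟨p, List.mem_cons_of_mem _ hp2, rfl, hi⟩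
    · rw [if_neg huv] at hp
      rcases List.mem_cons.mp hp with hp2 | hp2
      · subst hp2
        exact Or.inl ⟨(u, l), List.mem_cons_self .., rfl, hi⟩
      · rcases ih p hp2 i hi with ⟨p', hp', h1, h2⟩ | hr
        · exact Or.inl ⟨p', List.mem_cons_of_mem _ hp', h1, h2⟩
        · exact Or.inr hr

theorem foldl_addIdx_keysOK (idx : Nat) :
    ∀ (vs : List Int) (cd : List (Int × List Nat)), KeysOK cd →
      KeysOK (vs.foldl (fun cd v => addIdxA cd v idx) cd) := by
  intro vs
  induction vs with
  | nil => intro cd h; exact h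
  | cons v vs ih => intro cd h; exact ih _ (addIdxA_keysOK _ _ _ h)

theorem foldl_addIdx_eq_B (idx : Nat) :
    ∀ (vs : List Int) (cd : List (Int × List Nat)), KeysOK cd →
      vs.foldl (fun c v => dictAddTo (dictSetDefault c v) v idx) cd =
        vs.foldl (fun c v => addIdxA c v idx) cd := by
  intro vs
  induction vs with
  | nil => intro cd _; rfl
  | cons v vs ih =>
    intro cd h
    simp only [List.foldl_cons]
    rw [← addIdxA_eq_B _ _ _ h, ih _ (addIdxA_keysOK _ _ _ h)]

theorem getD_append_lt (l l' : List (List Int)) (i : Nat) (h : i < l.length) :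
    (l ++ l').getD i [] = l.getD i [] := by
  simp [List.getD_eq_getElem?_getD, List.getElem?_append_left h]

theorem getD_append_self (l : List (List Int)) (x : List Int) :
    (l ++ [x]).getD l.length [] = x := by
  simp [List.getD_eq_getElem?_getD]

theorem relRR_extend (cd : List (Int × List Nat)) (rtn : List (List Int)) (rrs : List Int)
    (h : RelRR cd rtn) : RelRR cd (rtn ++ [rrs]) := by
  intro p hp i hi
  obtain ⟨h1, h2⟩ := h p hp i hi
  refine ⟨by simpa using Nat.lt_succ_of_lt h1, ?_⟩
  rw [getD_append_lt _ _ _ h1]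
  exact h2

theorem foldl_addIdx_rel (rtn : List (List Int)) (rrs : List Int) :
    ∀ (vs : List Int) (cd : List (Int × List Nat)), (∀ v ∈ vs, v ∈ rrs) →
      RelRR cd (rtn ++ [rrs]) →
      RelRR (vs.foldl (fun cd v => addIdxA cd v rtn.length) cd) (rtn ++ [rrs]) := by
  intro vs
  induction vs with
  | nil => intro cd _ h; exact h
  | cons v vs ih =>
    intro cd hvs h
    simp only [List.foldl_cons]
    refine ih _ (fun w hw => hvs w (List.mem_cons_of_mem _ hw)) ?_
    intro p hp i hi
    rcases addIdxA_mem cd v rtn.length p hp i hi with ⟨p', hp', he, hm⟩ | ⟨he, hm⟩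
    · obtain ⟨h1, h2⟩ := h p' hp' i hm
      exact ⟨h1, he ▸ h2⟩
    · subst hm
      refine ⟨by simp, ?_⟩
    
      rw [getD_append_self, he]
      exact hvs v (List.mem_cons_self ..)

theorem build_go :
    ∀ (RR : List (List Int)) (cd : List (Int × List Nat)) (rtn : List (List Int)),
      KeysOK cd → RelRR cd rtn →
      KeysOK ((enumN rtn.length RR).foldl
          (fun st p =>
            (((pySetOrder p.2).foldl (fun cd v => addIdxA cd v p.1) st.1), st.2 ++ [pySetOrder p.2]))
          (cd, rtn)).1 ∧
      RelRR ((enumN rtn.length RR).foldl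
          (fun st p =>
            (((pySetOrder p.2).foldl (fun cd v => addIdxA cd v p.1) st.1), st.2 ++ [pySetOrder p.2]))
          (cd, rtn)).1
        ((enumN rtn.length RR).foldl
          (fun st p =>
            (((pySetOrder p.2).foldl (fun cd v => addIdxA cd v p.1) st.1), st.2 ++ [pySetOrder p.2]))
          (cd, rtn)).2 ∧
      (enumN rtn.length RR).foldl
          (fun cover p => (pySetOrder p.2).foldl (fun cover v => dictAddTo (dictSetDefault cover v) v p.1) cover)
          cd =
        ((enumN rtn.length RR).foldl
          (fun st p =>
            (((pySetOrder p.2).foldl (fun cd v => addIdxA cd v p.1) st.1), st.2 ++ [pySetOrder p.2]))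
          (cd, rtn)).1 := by
  intro RR
  induction RR with
  | nil => intro cd rtn h1 h2; exact ⟨h1, h2, rfl⟩
  | cons rr RR ih =>
    intro cd rtn h1 h2
    simp only [enumN, List.foldl_cons]
    have hk : KeysOK ((pySetOrder rr).foldl (fun cd v => addIdxA cd v rtn.length) cd) :=
      foldl_addIdx_keysOK _ _ _ h1
    have hr : RelRR ((pySetOrder rr).foldl (fun cd v => addIdxA cd v rtn.length) cd)
        (rtn ++ [pySetOrder rr]) :=
      foldl_addIdx_rel _ _ _ _ (fun v hv => hv) (relRR_extend _ _ _ h2)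
    have hlen : rtn.length + 1 = (rtn ++ [pySetOrder rr]).length := by simp
    have := ih ((pySetOrder rr).foldl (fun cd v => addIdxA cd v rtn.length) cd)
      (rtn ++ [pySetOrder rr]) hk hr
    rw [← hlen] at this
    refine ⟨this.1, this.2.1, ?_⟩
    rw [foldl_addIdx_eq_B _ _ _ h1]
    exact this.2.2

theorem build_ok (RR_sets : List (List Int)) :
    KeysOK (buildA RR_sets).1 ∧ RelRR (buildA RR_sets).1 (buildA RR_sets).2 ∧
      buildB RR_sets = (buildA RR_sets).1 := by
  have h0 : KeysOK ([] : List (Int × List Nat)) := by simp [KeysOK]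
  have h2 : RelRR ([] : List (Int × List Nat)) ([] : List (List Int)) := by
    intro p hp; cases hp
  have := build_go RR_sets [] [] h0 h2
  exact ⟨this.1, this.2.1, this.2.2⟩

-- ---- A's mutated cover_dict is the filtered original ----

theorem lookup_mapFilter (pairs : List (Int × List Nat)) (c : List Nat) (v : Int) :
    (mapFilter pairs c).lookup v = (pairs.lookup v).map (gainList c) := by
  induction pairs with
  | nil => rfl
  | cons p rest ih =>
    obtain ⟨u, l⟩ := p
    by_cases h : v = u
    · simp [mapFilter, List.lookup, h]
    · have hbe : (v == u) = false := by simp [h]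
      simpa [mapFilter, List.lookup, hbe] using ih

theorem scan_mapFilter (pairs : List (Int × List Nat)) (S : List Int) (c : List Nat) :
    scanA (mapFilter pairs c) S c = scanA pairs S c := by
  simp only [scanA, mapFilter, List.foldl_map]
  congr 1
  funext b p
  simp [gain_gain]

theorem discardOne_eq (cd : List (Int × List Nat)) (w : Int) (i : Nat) (h : KeysOK cd) :
    discardOne cd w i = cd.map (fun p => if p.1 = w then (p.1, p.2.filter (fun j => j ≠ i)) else p) := by
  induction cd with
  | nil => rfl
  | cons p rest ih =>
    obtain ⟨u, l⟩ := p
    simp only [KeysOK, List.map_cons, List.nodup_cons] at h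
    by_cases huw : u = w
    · subst huw
      have hmap : List.map (fun p => if p.1 = u then (p.1, p.2.filter (fun j => j ≠ i)) else p) rest = rest := by
        have hcg : ∀ a ∈ rest, (fun p => if p.1 = u then (p.1, p.2.filter (fun j => j ≠ i)) else p) a = id a := by
          intro a ha
          have hne : ¬ a.1 = u := fun hh => h.1 (hh ▸ List.mem_map_of_mem ha)
          simp [hne]
        rw [List.map_congr_left hcg, List.map_id]
      rw [discardOne]
      simp only [List.map_cons, hmap]
      by_cases hc : l.contains i
      · rw [if_pos hc]; simp
      · have hni : i ∉ l := by simpa using hc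
        have hfe : List.filter (fun j => decide (j ≠ i)) l = l := by
          apply List.filter_eq_self.mpr
          intro j hj
          simp only [decide_eq_true_eq]
          exact fun hji => hni (hji ▸ hj)
        rw [if_neg hc, hfe]; simp
    · rw [discardOne]
      simp only [if_neg huw, List.map_cons]
      rw [ih h.2]


theorem foldl_discard (i : Nat) :
    ∀ (us : List Int) (cd : List (Int × List Nat)), KeysOK cd →
      us.foldl (fun cd u => discardOne cd u i) cd =
        cd.map (fun p => if us.contains p.1 then (p.1, p.2.filter (fun j => j ≠ i)) else p) := by
  intro us
  induction us with
  | nil =>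
    intro cd _
    simp
  | cons u us ih =>
    intro cd h
    simp only [List.foldl_cons]
    rw [discardOne_eq _ _ _ h]
    have hK2 : KeysOK (cd.map (fun p => if p.1 = u then (p.1, p.2.filter (fun j => j ≠ i)) else p)) := by
      unfold KeysOK
      rw [List.map_map]
      have hfst : (Prod.fst ∘ fun p : Int × List Nat =>
          if p.1 = u then (p.1, List.filter (fun j => decide (j ≠ i)) p.2) else p) = Prod.fst := by
        funext p; by_cases hp : p.1 = u <;> simp [hp]
      rw [hfst]; exact h
    rw [ih _ hK2, List.map_map]
    apply List.map_congr_left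
    intro p _
    by_cases hpu : p.1 = u <;> by_cases hpus : us.contains p.1 <;>
      simp [Function.comp, hpu, List.filter_filter]

theorem keysOK_mapFilter (pairs : List (Int × List Nat)) (c : List Nat) (h : KeysOK pairs) :
    KeysOK (mapFilter pairs c) := by
  unfold KeysOK mapFilter at *
  rw [List.map_map]
  simpa using h

theorem discardAll_eq (pairs : List (Int × List Nat)) (rtn : List (List Int))
    (hK : KeysOK pairs) (hR : RelRR pairs rtn) :
    ∀ (newly : List Nat) (c : List Nat),
      discardAll (mapFilter pairs c) newly rtn = mapFilter pairs (c ++ newly) := by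
  intro newly
  induction newly with
  | nil =>
    intro c
    simp [discardAll]
  | cons i rest ih =>
    intro c
    have hstep : (rtn.getD i []).foldl (fun cd u => discardOne cd u i) (mapFilter pairs c) =
        mapFilter pairs (c ++ [i]) := by
      rw [foldl_discard i _ _ (keysOK_mapFilter pairs c hK)]
      unfold mapFilter
      rw [List.map_map]
      apply List.map_congr_left
      intro p hp
      by_cases hc : (rtn.getD i []).contains p.1
      · simp only [Function.comp, hc, if_pos]
        rw [gain_append]
        unfold gainList
        congr 1
        apply List.filter_congr
        intro j _
        by_cases hj : j = i <;> simp [hj]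
      · simp only [Function.comp, hc, if_neg, Bool.false_eq_true, not_false_iff]
        have : gainList (c ++ [i]) p.2 = gainList c p.2 := by
          unfold gainList
          apply List.filter_congr
          intro j hj
          have hji : j ≠ i := by
            intro hji
            subst hji
            exact hc (by simpa using (hR p hp j hj).2)
          simp [hji]
        rw [this]
    rw [discardAll, List.foldl_cons]
    have h2 := ih (c ++ [i])
    unfold discardAll at h2
    rw [hstep, h2]
    simp

-- ---- characterization of A's selection scan ----

def Best (covered : List Nat) (C : List (Nat × Int × List Nat)) (r : Option Int × Int) : Prop :=
  (C = [] ∧ r = (none, -1)) ∨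
  (∃ q ∈ C, r = (some q.2.1, gI covered q.2.2) ∧
    (∀ q' ∈ C, gI covered q'.2.2 ≤ gI covered q.2.2) ∧
    (∀ q' ∈ C, q'.1 < q.1 → gI covered q'.2.2 < gI covered q.2.2))

theorem scan_go (S : List Int) (c : List Nat) :
    ∀ (pairs : List (Int × List Nat)) (s : Nat) (b : Option Int × Int),
      pairs.foldl
        (fun b p =>
          if S.contains p.1 then b
          else if ((gainList c p.2).length : Int) > b.2 then (some p.1, ((gainList c p.2).length : Int)) else b) b =
      ((enumN s pairs).filter (fun q => !S.contains q.2.1)).foldl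
        (fun b q => if gI c q.2.2 > b.2 then (some q.2.1, gI c q.2.2) else b) b := by
  intro pairs
  induction pairs with
  | nil => intro s b; rfl
  | cons p rest ih =>
    intro s b
    obtain ⟨v, l⟩ := p
    by_cases hv : S.contains v
    · have hv' : v ∈ S := by simpa using hv
      have h1 : List.filter (fun q => !S.contains q.2.1) (enumN s ((v, l) :: rest)) =
          List.filter (fun q => !S.contains q.2.1) (enumN (s+1) rest) := by
        simp [enumN, hv']
      rw [h1, List.foldl_cons, if_pos hv]
      exact ih (s+1) b
    · have hv' : v ∉ S := by simpa using hv
      have h1 : List.filter (fun q => !S.contains q.2.1) (enumN s ((v, l) :: rest)) =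
          (s, v, l) :: List.filter (fun q => !S.contains q.2.1) (enumN (s+1) rest) := by
        simp [enumN, hv']
      rw [h1, List.foldl_cons, if_neg hv, List.foldl_cons]
      rw [ih (s+1)]
      rfl

theorem scanA_eq_fold (pairs : List (Int × List Nat)) (S : List Int) (c : List Nat) :
    scanA pairs S c =
      (cands pairs S).foldl
        (fun b q => if gI c q.2.2 > b.2 then (some q.2.1, gI c q.2.2) else b) (none, -1) := by
  unfold scanA cands
  exact scan_go S c pairs 0 (none, -1)

theorem best_fold (c : List Nat) (C : List (Nat × Int × List Nat))
    (hs : C.Pairwise (fun a b => a.1 < b.1)) :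
    Best c C (C.foldl (fun b q => if gI c q.2.2 > b.2 then (some q.2.1, gI c q.2.2) else b) (none, -1)) := by
  induction C using List.reverseRecOn with
  | nil => exact Or.inl ⟨rfl, rfl⟩
  | append_singleton C q0 ih =>
    have hsC : C.Pairwise (fun a b => a.1 < b.1) := hs.sublist (List.sublist_append_left _ _)
    have hlt : ∀ a ∈ C, a.1 < q0.1 := by
      intro a ha
      exact (List.pairwise_append.mp hs).2.2 a ha q0 (List.mem_singleton_self _)
    have hnn : (0 : Int) ≤ gI c q0.2.2 := Int.natCast_nonneg _
    rw [List.foldl_append, List.foldl_cons, List.foldl_nil]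
    rcases ih hsC with ⟨hC, hr⟩ | ⟨q, hq, hr, hmax, hord⟩
    · subst hC
      rw [hr]
      simp only [List.nil_append]
      have : gI c q0.2.2 > (-1 : Int) := by omega
      rw [if_pos this]
      refine Or.inr ⟨q0, List.mem_singleton_self _, rfl, ?_, ?_⟩
      · intro q' hq'
        rw [List.mem_singleton.mp hq']
      · intro q' hq' hlt'
        rw [List.mem_singleton.mp hq'] at hlt'
        exact absurd hlt' (lt_irrefl _)
    · rw [hr]
      by_cases hgt : gI c q0.2.2 > gI c q.2.2
      · rw [if_pos hgt]
        refine Or.inr ⟨q0, List.mem_append_right _ (List.mem_singleton_self _), rfl, ?_, ?_⟩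
        · intro q' hq'
          rcases List.mem_append.mp hq' with h | h
          · exact le_of_lt (lt_of_le_of_lt (hmax q' h) hgt)
          · rw [List.mem_singleton.mp h]
        · intro q' hq' hlt'
          rcases List.mem_append.mp hq' with h | h
          · exact lt_of_le_of_lt (hmax q' h) hgt
          · rw [List.mem_singleton.mp h] at hlt'
            exact absurd hlt' (lt_irrefl _)
      · rw [if_neg hgt]
        refine Or.inr ⟨q, List.mem_append_left _ hq, rfl, ?_, ?_⟩
        · intro q' hq'
          rcases List.mem_append.mp hq' with h | h
          · exact hmax q' h
          · rw [List.mem_singleton.mp h]; omega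
        · intro q' hq' hlt'
          rcases List.mem_append.mp hq' with h | h
          · exact hord q' h hlt'
          · rw [List.mem_singleton.mp h] at hlt'
            exact absurd hlt' (by have := hlt q hq; omega)

theorem enumN_mem_le {α : Type} : ∀ (l : List α) (s : Nat), ∀ q ∈ enumN s l, s ≤ q.1 := by
  intro l
  induction l with
  | nil => intro s q hq; cases hq
  | cons x xs ih =>
    intro s q hq
    rcases List.mem_cons.mp hq with h | h
    · subst h; exact le_refl _
    · exact Nat.le_of_succ_le (ih (s+1) q h)

theorem enumN_pairwise {α : Type} : ∀ (l : List α) (s : Nat),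
    (enumN s l).Pairwise (fun a b => a.1 < b.1) := by
  intro l
  induction l with
  | nil => intro s; exact List.Pairwise.nil
  | cons x xs ih =>
    intro s
    refine List.Pairwise.cons ?_ (ih (s+1))
    intro q hq
    exact Nat.lt_of_succ_le (enumN_mem_le xs (s+1) q hq)

theorem cands_pairwise (pairs : List (Int × List Nat)) (S : List Int) :
    (cands pairs S).Pairwise (fun a b => a.1 < b.1) :=
  (enumN_pairwise pairs 0).sublist List.filter_sublist

theorem scanA_best (pairs : List (Int × List Nat)) (S : List Int) (c : List Nat) :
    Best c (cands pairs S) (scanA pairs S c) := by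
  rw [scanA_eq_fold]
  exact best_fold c _ (cands_pairwise pairs S)

-- ---- heap-side lemmas ----

theorem keyLt_iff (a b : Int × Nat) :
    keyLt a b = true ↔ (a.1 < b.1 ∨ (a.1 = b.1 ∧ a.2 < b.2)) := by
  simp [keyLt]

theorem keyLt_irrefl (a : Int × Nat) : keyLt a a = false := by
  simp [keyLt]

theorem keyLt_asymm (a b : Int × Nat) (h : keyLt a b = true) : keyLt b a = false := by
  rw [keyLt_iff] at h
  rw [Bool.eq_false_iff]
  intro h2
  rw [keyLt_iff] at h2
  omega

theorem keyLt_false_trans (a b c : Int × Nat) (h1 : keyLt a b = false) (h2 : keyLt b c = false) :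
    keyLt a c = false := by
  rw [Bool.eq_false_iff] at *
  intro h3
  rw [keyLt_iff] at h3
  apply h1
  rw [keyLt_iff]
  by_contra h4
  apply h2
  rw [keyLt_iff]
  omega

theorem keyLt_total (a b : Int × Nat) (h1 : keyLt a b = false) (h2 : keyLt b a = false) : a = b := by
  have k1 : ¬ (a.1 < b.1 ∨ (a.1 = b.1 ∧ a.2 < b.2)) := by
    rw [← keyLt_iff, h1]; simp
  have k2 : ¬ (b.1 < a.1 ∨ (b.1 = a.1 ∧ b.2 < a.2)) := by
    rw [← keyLt_iff, h2]; simp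
  obtain ⟨a1, a2⟩ := a
  obtain ⟨b1, b2⟩ := b
  simp only [Prod.mk.injEq]
  simp only at k1 k2
  omega

theorem heapMin_none (heap : List (Int × Nat × Int)) : heapMin heap = none ↔ heap = [] := by
  cases heap with
  | nil => simp [heapMin]
  | cons e rest =>
    simp only [heapMin]
    cases heapMin rest with
    | none => simp
    | some m =>
      by_cases h : keyLt (m.1, m.2.1) (e.1, e.2.1) <;> simp [h]

theorem heapMin_spec (heap : List (Int × Nat × Int)) (e : Int × Nat × Int)
    (h : heapMin heap = some e) :
    e ∈ heap ∧ ∀ e' ∈ heap, keyLt (e'.1, e'.2.1) (e.1, e.2.1) = false := by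
  induction heap generalizing e with
  | nil => cases h
  | cons a rest ih =>
    rw [heapMin] at h
    cases hm : heapMin rest with
    | none =>
      rw [hm] at h
      have hr : rest = [] := (heapMin_none rest).mp hm
      subst hr
      cases h
      refine ⟨List.mem_singleton_self _, ?_⟩
      intro e' he'
      rw [List.mem_singleton.mp he']
      exact keyLt_irrefl _
    | some m =>
      rw [hm] at h
      dsimp only at h
      obtain ⟨hmem, hmin⟩ := ih m hm
      by_cases hk : keyLt (m.1, m.2.1) (a.1, a.2.1)
      · rw [if_pos hk] at h
        cases h
        refine ⟨List.mem_cons_of_mem _ hmem, ?_⟩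
        intro e' he'
        rcases List.mem_cons.mp he' with h1 | h1
        · subst h1
          exact keyLt_asymm _ _ hk
        · exact hmin e' h1
      · rw [if_neg hk] at h
        cases h
        refine ⟨List.mem_cons_self .., ?_⟩
        intro e' he'
        rcases List.mem_cons.mp he' with h1 | h1
        · subst h1
          exact keyLt_irrefl _
        · exact keyLt_false_trans _ _ _ (hmin e' h1) (Bool.eq_false_iff.mpr hk)

theorem lookup_mem (pairs : List (Int × List Nat)) (v : Int) (l : List Nat)
    (hK : KeysOK pairs) (h : (v, l) ∈ pairs) : pairs.lookup v = some l := by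
  induction pairs with
  | nil => cases h
  | cons p rest ih =>
    obtain ⟨u, l'⟩ := p
    simp only [KeysOK, List.map_cons, List.nodup_cons] at hK
    rcases List.mem_cons.mp h with h1 | h1
    · cases h1
      simp [List.lookup]
    · have hvu : ¬ v = u := by
        intro hh
        subst hh
        exact hK.1 (List.mem_map_of_mem h1 : (v, l).1 ∈ _)
      have hbe : (v == u) = false := by simp [hvu]
      simp only [List.lookup, hbe]
      exact ih hK.2 h1

theorem enumN_mem_snd {α : Type} : ∀ (l : List α) (s : Nat) (q : Nat × α),
    q ∈ enumN s l → q.2 ∈ l := by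
  intro l
  induction l with
  | nil => intro s q hq; cases hq
  | cons x xs ih =>
    intro s q hq
    rcases List.mem_cons.mp hq with h | h
    · subst h; exact List.mem_cons_self ..
    · exact List.mem_cons_of_mem _ (ih (s+1) q h)

theorem enumN_map_snd {α : Type} : ∀ (l : List α) (s : Nat),
    (enumN s l).map (fun q => q.2) = l := by
  intro l
  induction l with
  | nil => intro s; rfl
  | cons x xs ih => intro s; simp [enumN, ih]

theorem cands_sub (pairs : List (Int × List Nat)) (S : List Int) (q : Nat × Int × List Nat)
    (h : q ∈ cands pairs S) : q.2 ∈ pairs :=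
  enumN_mem_snd pairs 0 q (List.mem_of_mem_filter h)

theorem cands_lookup (pairs : List (Int × List Nat)) (S : List Int) (q : Nat × Int × List Nat)
    (hK : KeysOK pairs) (h : q ∈ cands pairs S) : pairs.lookup q.2.1 = some q.2.2 :=
  lookup_mem pairs q.2.1 q.2.2 hK (by have := cands_sub pairs S q h; exact this)


theorem cands_fst_nodup (pairs : List (Int × List Nat)) (S : List Int) :
    ((cands pairs S).map (fun q => q.1)).Nodup := by
  have h := cands_pairwise pairs S
  exact (List.pairwise_map.mpr h).imp (fun hab => Nat.ne_of_lt hab)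

theorem cands_nodes_nodup (pairs : List (Int × List Nat)) (S : List Int) (hK : KeysOK pairs) :
    ((cands pairs S).map (fun q => q.2.1)).Nodup := by
  have h1 : ((enumN 0 pairs).map (fun q => q.2.1)).Nodup := by
    have : (enumN 0 pairs).map (fun q => q.2.1) = pairs.map Prod.fst := by
      have := enumN_map_snd pairs 0
      calc (enumN 0 pairs).map (fun q => q.2.1)
          = ((enumN 0 pairs).map (fun q => q.2)).map Prod.fst := by rw [List.map_map]; rfl
        _ = pairs.map Prod.fst := by rw [this]
    rw [this]; exact hK
  exact h1.sublist (List.Sublist.map _ (List.filter_sublist))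

theorem best_unique (covered : List Nat) (C : List (Nat × Int × List Nat))
    (hnd : (C.map (fun q => q.1)).Nodup)
    (q1 q2 : Nat × Int × List Nat) (h1 : q1 ∈ C) (h2 : q2 ∈ C)
    (hm1 : ∀ q' ∈ C, gI covered q'.2.2 ≤ gI covered q1.2.2)
    (ho1 : ∀ q' ∈ C, q'.1 < q1.1 → gI covered q'.2.2 < gI covered q1.2.2)
    (hm2 : ∀ q' ∈ C, gI covered q'.2.2 ≤ gI covered q2.2.2)
    (ho2 : ∀ q' ∈ C, q'.1 < q2.1 → gI covered q'.2.2 < gI covered q2.2.2) :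
    q1 = q2 := by
  have hg : gI covered q1.2.2 = gI covered q2.2.2 :=
    le_antisymm (hm2 q1 h1) (hm1 q2 h2)
  have ho : q1.1 = q2.1 := by
    by_contra hne
    rcases Nat.lt_or_ge q1.1 q2.1 with h | h
    · exact absurd (ho2 q1 h1 h) (by omega)
    · have : q2.1 < q1.1 := Nat.lt_of_le_of_ne h (fun hh => hne hh.symm)
      exact absurd (ho1 q2 h2 this) (by omega)
  exact List.inj_on_of_nodup_map hnd h1 h2 ho

theorem keyLt_trans_fl (m e t : Int × Nat) (h1 : keyLt m e = false) (h2 : keyLt m t = true) :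
    keyLt e t = true := by
  rw [Bool.eq_false_iff] at h1
  rw [keyLt_iff] at *
  by_contra h3
  apply h1
  rw [keyLt_iff]
  omega

theorem keyLt_true_of_false_ne (a b : Int × Nat) (h1 : keyLt b a = false) (h2 : a ≠ b) :
    keyLt a b = true := by
  by_contra h3
  exact h2 (keyLt_total a b (Bool.eq_false_iff.mpr h3) h1)

theorem staleN_le (pairs : List (Int × List Nat)) (covered : List Nat)
    (heap : List (Int × Nat × Int)) : staleN pairs covered heap ≤ heap.length :=
  List.countP_le_length

theorem popBest_go (pairs : List (Int × List Nat)) (S : List Int) (covered : List Nat)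
    (hK : KeysOK pairs) :
    ∀ (fuel : Nat) (heap : List (Int × Nat × Int)),
      InvH pairs S covered heap →
      staleN pairs covered heap < fuel →
      (cands pairs S = [] ∧ popBest fuel heap pairs covered = none) ∨
      (∃ q ∈ cands pairs S, ∃ rest,
        popBest fuel heap pairs covered = some ((gI covered q.2.2, q.2.1), rest) ∧
        (∀ q' ∈ cands pairs S, gI covered q'.2.2 ≤ gI covered q.2.2) ∧
        (∀ q' ∈ cands pairs S, q'.1 < q.1 → gI covered q'.2.2 < gI covered q.2.2) ∧
        (rest.map (fun e => e.2.1)).Perm (((cands pairs S).map (fun q => q.1)).erase q.1) ∧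
        (∀ e ∈ rest, (∃ q' ∈ cands pairs S, q'.1 = e.2.1 ∧ q'.2.1 = e.2.2) ∧
          e.1 ≤ -(trueG pairs covered e.2.2)) ∧
        q.1 ∉ rest.map (fun e => e.2.1)) := by
  intro fuel
  induction fuel with
  | zero => intro heap _ h; exact absurd h (Nat.not_lt_zero _)
  | succ fuel ih =>
    intro heap hInv hst
    obtain ⟨hperm, hent⟩ := hInv
    rw [popBest]
    cases hm : heapMin heap with
    | none =>
      have hheap : heap = [] := (heapMin_none heap).mp hm
      subst hheap
      have h0 : (cands pairs S).map (fun q => q.1) = [] := (List.Perm.eq_nil hperm.symm)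
      exact Or.inl ⟨List.map_eq_nil_iff.mp h0, rfl⟩
    | some e =>
      obtain ⟨heMem, heMin⟩ := heapMin_spec heap e hm
      obtain ⟨⟨qe, hqe, hqo, hqn⟩, hqb⟩ := hent e heMem
      have hheap : heap.Perm (e :: heap.erase e) := List.perm_cons_erase heMem
      have hlook : pairs.lookup e.2.2 = some qe.2.2 := by
        rw [← hqn]; exact cands_lookup _ _ _ hK hqe
      have htg : trueG pairs covered e.2.2 = gI covered qe.2.2 := by
        unfold trueG; rw [hlook]; rfl
      have hOrdsNodup : (heap.map (fun e => e.2.1)).Nodup :=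
        (List.Perm.nodup_iff hperm).mpr (cands_fst_nodup pairs S)
      have hordPerm : (heap.map (fun e => e.2.1)).Perm (e.2.1 :: (heap.erase e).map (fun e => e.2.1)) := by
        simpa using hheap.map (fun e => e.2.1)
      dsimp only
      rw [hlook]
      dsimp only [Option.getD_some]
      cases hm2 : heapMin (heap.erase e) with
      | none =>
        dsimp only
        have hrest : heap.erase e = [] := (heapMin_none _).mp hm2
        have hCone : (cands pairs S).map (fun q => q.1) = [e.2.1] := by
          rw [hrest] at hordPerm
          exact List.perm_singleton.mp (hperm.symm.trans (by simpa using hordPerm))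
        right
        refine ⟨qe, hqe, heap.erase e, ?_, ?_, ?_, ?_, ?_, ?_⟩
        · rw [hqn]; rfl
        · intro q' hq'
          have : q'.1 ∈ [e.2.1] := hCone ▸ List.mem_map_of_mem hq'
          have hq'e : q'.1 = e.2.1 := List.mem_singleton.mp this
          have : q' = qe := List.inj_on_of_nodup_map (cands_fst_nodup pairs S) hq' hqe (by rw [hq'e, hqo])
          rw [this]
        · intro q' hq' hlt
          have : q'.1 ∈ [e.2.1] := hCone ▸ List.mem_map_of_mem hq'
          have hq'e : q'.1 = e.2.1 := List.mem_singleton.mp this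
          have : q' = qe := List.inj_on_of_nodup_map (cands_fst_nodup pairs S) hq' hqe (by rw [hq'e, hqo])
          rw [this] at hlt
          exact absurd hlt (lt_irrefl _)
        · rw [hrest, hCone, ← hqo]
          simp
        · intro e' he'
          rw [hrest] at he'
          cases he'
        · rw [hrest]
          simp
      | some m =>
        dsimp only
        have hmMemR : m ∈ heap.erase e := (heapMin_spec _ m hm2).1
        have hmMinR := (heapMin_spec _ m hm2).2
        have hmMemH : m ∈ heap := List.mem_of_mem_erase hmMemR
        by_cases hkl : keyLt (m.1, m.2.1) (-(((gainList covered qe.2.2).length : Int)), e.2.1) = true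
        · -- stale case: push back the exact key and recurse
          rw [if_pos hkl]
          have hestale : e.1 < -(trueG pairs covered e.2.2) := by
            have h1 : keyLt (m.1, m.2.1) (e.1, e.2.1) = false := heMin m hmMemH
            have h2 : keyLt (e.1, e.2.1) (-(((gainList covered qe.2.2).length : Int)), e.2.1) = true :=
              keyLt_trans_fl _ _ _ h1 hkl
            rw [keyLt_iff] at h2
            rw [htg]
            unfold gI
            simp only at h2
            omega
          have hInv' : InvH pairs S covered ((-(((gainList covered qe.2.2).length : Int)), e.2.1, e.2.2) :: heap.erase e) := by
            constructor
            · simpa using (hordPerm.symm.trans hperm)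
            · intro e' he'
              rcases List.mem_cons.mp he' with h1 | h1
              · subst h1
                refine ⟨⟨qe, hqe, hqo, hqn⟩, ?_⟩
                rw [htg]
                unfold gI
                exact le_refl _
              · exact hent e' (List.mem_of_mem_erase h1)
          have hstale' : staleN pairs covered ((-(((gainList covered qe.2.2).length : Int)), e.2.1, e.2.2) :: heap.erase e) < fuel := by
            have hc1 : staleN pairs covered heap = staleN pairs covered (e :: heap.erase e) :=
              List.Perm.countP_eq _ hheap
            have hc2 : staleN pairs covered (e :: heap.erase e) =
                staleN pairs covered (heap.erase e) + 1 := by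
              unfold staleN
              rw [List.countP_cons]
              simp [hestale]
            have hc3 : staleN pairs covered ((-(((gainList covered qe.2.2).length : Int)), e.2.1, e.2.2) :: heap.erase e) =
                staleN pairs covered (heap.erase e) := by
              unfold staleN
              rw [List.countP_cons]
              simp [htg, gI]
            omega
          exact ih _ hInv' hstale'
        · -- fresh case: the popped key is exact and beats the heap, so it is the scan's choice
          rw [if_neg hkl]
          have hklf : keyLt (m.1, m.2.1) (-(((gainList covered qe.2.2).length : Int)), e.2.1) = false :=
            Bool.eq_false_iff.mpr hkl
          have hdom : ∀ q' ∈ cands pairs S, q' ≠ qe →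
              keyLt (-(gI covered qe.2.2), qe.1) (-(gI covered q'.2.2), q'.1) = true := by
            intro q' hq' hne
            have hq'o : q'.1 ∈ heap.map (fun e => e.2.1) :=
              hperm.symm.subset (List.mem_map_of_mem hq')
            obtain ⟨e', he'Mem, he'o⟩ := List.mem_map.mp hq'o
            have he'ne : e' ≠ e := by
              intro hh
              subst hh
              exact hne (List.inj_on_of_nodup_map (cands_fst_nodup pairs S) hq' hqe (by rw [← he'o, hqo]))
            have he'R : e' ∈ heap.erase e := (List.mem_erase_of_ne he'ne).mpr he'Mem
            obtain ⟨⟨q'', hq'', hq''o, hq''n⟩, hq''b⟩ := hent e' he'Mem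
            have hq''q' : q'' = q' :=
              List.inj_on_of_nodup_map (cands_fst_nodup pairs S) hq'' hq' (by rw [hq''o, he'o])
            have hq'n : q'.2.1 = e'.2.2 := hq''q' ▸ hq''n
            have htg' : trueG pairs covered e'.2.2 = gI covered q'.2.2 := by
              unfold trueG
              rw [← hq'n, cands_lookup _ _ _ hK hq']
              rfl
            have c2 : keyLt (e'.1, e'.2.1) (m.1, m.2.1) = false := hmMinR e' he'R
            have c3 : keyLt (-(gI covered q'.2.2), e'.2.1) (e'.1, e'.2.1) = false := by
              rw [Bool.eq_false_iff]
              intro hcon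
              rw [keyLt_iff] at hcon
              rw [htg'] at hq''b
              simp only at hcon
              omega
            have chain : keyLt (-(gI covered q'.2.2), e'.2.1) (-(gI covered qe.2.2), e.2.1) = false :=
              keyLt_false_trans _ _ _ (keyLt_false_trans _ _ _ c3 c2) hklf
            have hone : qe.1 ≠ q'.1 := fun hh =>
              hne (List.inj_on_of_nodup_map (cands_fst_nodup pairs S) hq' hqe hh.symm)
            rw [he'o] at chain
            rw [← hqo] at chain
            exact keyLt_true_of_false_ne _ _ chain (by
              intro hh
              exact hone (congrArg Prod.snd hh))
          right
          refine ⟨qe, hqe, heap.erase e, ?_, ?_, ?_, ?_, ?_, ?_⟩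
          · rw [hqn]; rfl
          · intro q' hq'
            by_cases hne : q' = qe
            · rw [hne]
            · have := hdom q' hq' hne
              rw [keyLt_iff] at this
              simp only at this
              omega
          · intro q' hq' hlt
            by_cases hne : q' = qe
            · rw [hne] at hlt; exact absurd hlt (lt_irrefl _)
            · have := hdom q' hq' hne
              rw [keyLt_iff] at this
              simp only at this
              omega
          · have h1 : (((cands pairs S).map (fun q => q.1)).erase qe.1).Perm
                ((e.2.1 :: (heap.erase e).map (fun e => e.2.1)).erase qe.1) :=
              (hperm.symm.trans hordPerm).erase qe.1
            rw [hqo] at h1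
            rw [List.erase_cons_head] at h1
            rw [hqo]
            exact h1.symm
          · intro e' he'
            exact hent e' (List.mem_of_mem_erase he')
          · have hnodup2 : (e.2.1 :: (heap.erase e).map (fun e => e.2.1)).Nodup :=
              (List.Perm.nodup_iff hordPerm).mp hOrdsNodup
            rw [hqo]
            exact (List.nodup_cons.mp hnodup2).1

theorem cands_append (pairs : List (Int × List Nat)) (S : List Int) (v : Int) :
    cands pairs (S ++ [v]) = (cands pairs S).filter (fun x => decide (x.2.1 ≠ v)) := by
  unfold cands
  rw [List.filter_filter]
  apply List.filter_congr
  intro x _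
  by_cases h1 : x.2.1 ∈ S <;> by_cases h2 : x.2.1 = v <;> simp [h1, h2]

theorem filter_ne_erase (v : Int) (q : Nat × Int × List Nat) (hv : q.2.1 = v) :
    ∀ (C : List (Nat × Int × List Nat)), ((C.map (fun x => x.2.1)).Nodup) → q ∈ C →
      C.filter (fun x => decide (x.2.1 ≠ v)) = C.erase q := by
  intro C
  induction C with
  | nil => intro _ hq; cases hq
  | cons a rest ih =>
    intro hnd hq
    simp only [List.map_cons, List.nodup_cons] at hnd
    by_cases haq : a = q
    · subst haq
      have hfe : rest.filter (fun x => decide (x.2.1 ≠ v)) = rest := by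
        apply List.filter_eq_self.mpr
        intro x hx
        simp only [decide_eq_true_eq]
        intro hxv
        apply hnd.1
        have hax : a.2.1 = x.2.1 := by rw [hv, hxv]
        rw [hax]
        exact List.mem_map_of_mem hx
      have hcond : (decide (a.2.1 ≠ v)) = false := by simp [hv]
      rw [List.erase_cons_head, List.filter_cons, hcond]
      simpa using hfe
    · have hqrest : q ∈ rest := by
        rcases List.mem_cons.mp hq with h | h
        · exact absurd h.symm haq
        · exact h
      have hav : ¬ a.2.1 = v := by
        intro hav
        apply hnd.1
        rw [hav, ← hv]
        exact List.mem_map_of_mem hqrest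
      have hcond : (decide (a.2.1 ≠ v)) = true := by simp [hav]
      rw [List.filter_cons, hcond]
      simp only [if_true]
      rw [List.erase_cons_tail (by simp [haq])]
      rw [ih hnd.2 hqrest]

theorem erase_map_fst_perm (C : List (Nat × Int × List Nat)) (q : Nat × Int × List Nat)
    (hq : q ∈ C) : ((C.erase q).map (fun x => x.1)).Perm ((C.map (fun x => x.1)).erase q.1) := by
  have h1 : C.Perm (q :: C.erase q) := List.perm_cons_erase hq
  have h2 : (C.map (fun x => x.1)).Perm (q.1 :: (C.erase q).map (fun x => x.1)) := by
    simpa using h1.map (fun x => x.1)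
  have h3 : (C.map (fun x => x.1)).Perm (q.1 :: (C.map (fun x => x.1)).erase q.1) :=
    List.perm_cons_erase (List.mem_map_of_mem hq)
  exact (h2.symm.trans h3).cons_inv

theorem trueG_mono (pairs : List (Int × List Nat)) (c d : List Nat) (v : Int) :
    trueG pairs (c ++ d) v ≤ trueG pairs c v := by
  unfold trueG gI
  exact_mod_cast gain_append_le c d _

theorem loop_eq (pairs : List (Int × List Nat)) (rtn : List (List Int))
    (hK : KeysOK pairs) (hR : RelRR pairs rtn) :
    ∀ (fuel : Nat) (covered : List Nat) (S : List Int) (heap : List (Int × Nat × Int)),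
      InvH pairs S covered heap →
      loopA fuel (mapFilter pairs covered) rtn covered S = loopB fuel heap pairs covered S := by
  intro fuel
  induction fuel with
  | zero => intro covered S heap _; rfl
  | succ fuel ih =>
    intro covered S heap hInv
    rw [loopA, loopB]
    have hscan : scanA (mapFilter pairs covered) S covered = scanA pairs S covered :=
      scan_mapFilter pairs S covered
    have hpb := popBest_go pairs S covered hK (heap.length + 1) heap hInv
      (Nat.lt_succ_of_le (staleN_le pairs covered heap))
    rcases hpb with ⟨hC, hnone⟩ | ⟨q, hq, rest, heq, hmax, hord, hperm2, hent2, hnotin⟩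
    · rw [hnone]
      rcases scanA_best pairs S covered with ⟨_, hr⟩ | ⟨q, hqmem, _⟩
      · rw [hscan, hr]
      · rw [hC] at hqmem; cases hqmem
    · rcases scanA_best pairs S covered with ⟨hCnil, _⟩ | ⟨qs, hqs, hr, hmaxs, hords⟩
      · rw [hCnil] at hq; cases hq
      · have hqq : qs = q :=
          best_unique covered _ (cands_fst_nodup pairs S) qs q hqs hq hmaxs hords hmax hord
        subst hqq
        rw [hscan, hr, heq]
        dsimp only
        by_cases hg : gI covered qs.2.2 ≤ 0
        · rw [if_pos hg, if_pos hg]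
        · rw [if_neg hg, if_neg hg]
          have hlookB : ((pairs.lookup qs.2.1).getD []) = qs.2.2 := by
            rw [cands_lookup _ _ _ hK hqs]; rfl
          have hnewly : gainList covered (((mapFilter pairs covered).lookup qs.2.1).getD []) =
              gainList covered qs.2.2 := by
            rw [lookup_mapFilter, cands_lookup _ _ _ hK hqs]
            exact gain_gain covered qs.2.2
          rw [hnewly, hlookB]
          rw [discardAll_eq pairs rtn hK hR]
          apply ih (covered ++ gainList covered qs.2.2) (S ++ [qs.2.1]) rest
          have hCnext : cands pairs (S ++ [qs.2.1]) = (cands pairs S).erase qs := by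
            rw [cands_append]
            exact filter_ne_erase qs.2.1 qs rfl (cands pairs S)
              (cands_nodes_nodup pairs S hK) hqs
          constructor
          · rw [hCnext]
            exact hperm2.trans (erase_map_fst_perm _ qs hqs).symm
          · intro e' he'
            obtain ⟨⟨q', hq', ho', hn'⟩, hb'⟩ := hent2 e' he'
            have hq'ne : q' ≠ qs := by
              intro hh
              subst hh
              exact hnotin (ho' ▸ List.mem_map_of_mem he')
            refine ⟨⟨q', ?_, ho', hn'⟩, ?_⟩
            · rw [hCnext]
              exact (List.mem_erase_of_ne hq'ne).mpr hq'
            · calc e'.1 ≤ -(trueG pairs covered e'.2.2) := hb'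
                _ ≤ -(trueG pairs (covered ++ gainList covered qs.2.2) e'.2.2) := by
                    have := trueG_mono pairs covered (gainList covered qs.2.2) e'.2.2
                    omega

theorem mapFilter_nil (pairs : List (Int × List Nat)) : mapFilter pairs [] = pairs := by
  unfold mapFilter
  have : ∀ p ∈ pairs, (fun p : Int × List Nat => (p.1, gainList [] p.2)) p = id p := by
    intro p _
    simp [gain_nil]
  rw [List.map_congr_left this, List.map_id]

theorem cands_nil (pairs : List (Int × List Nat)) : cands pairs [] = enumN 0 pairs := by
  unfold cands
  simp

theorem NodeSelection_spec : Claim_equal_NodeSelection := by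
  intro RR_sets k _hdom
  unfold Spec_NodeSelection NodeSelection NodeSelection_alt
  by_cases h0 : RR_sets = [] ∨ k ≤ 0
  · rw [if_pos h0, if_pos h0]
  · rw [if_neg h0, if_neg h0]
    obtain ⟨hK, hR, hBB⟩ := build_ok RR_sets
    dsimp only
    rw [hBB]
    have hInv : InvH (buildA RR_sets).1 [] []
        ((enumN 0 (buildA RR_sets).1).map (fun p => (-(p.2.2.length : Int), p.1, p.2.1))) := by
      constructor
      · rw [cands_nil, List.map_map]
        exact List.Perm.refl _
      · intro e he
        obtain ⟨q, hq, rfl⟩ := List.mem_map.mp he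
        have hqc : q ∈ cands (buildA RR_sets).1 [] := by rw [cands_nil]; exact hq
        refine ⟨⟨q, hqc, rfl, rfl⟩, ?_⟩
        have htg0 : trueG (buildA RR_sets).1 [] q.2.1 = ((q.2.2.length : Nat) : Int) := by
          unfold trueG
          rw [cands_lookup _ _ _ hK hqc]
          unfold gI
          rw [Option.getD_some, gain_nil]
        rw [htg0]
    have H := loop_eq _ _ hK hR k.toNat [] [] _ hInv
    rw [mapFilter_nil] at H
    exact H
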